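-- pv_equiv track=rewrite | github.com/RuanBarbosa00/AiTaskOrganizer | AI Project/src/image_reader.py | merge_into_lines
-- ===== SOURCE A (Python) =====
-- def merge_into_lines(words):
--     lines = []
--     buffer = []
--
--     for w in words:
--         if not isinstance(w, str):
--             continue
--
--         w = w.strip()
--         if not w:
--             continue
--
--         if any(w.startswith(m) for m in ["Jan", "Feb", "Mar", "Apr", "May", "Jun",
--                                          "Jul", "Aug", "Sep", "Oct", "Nov", "Dec"]):
--             if buffer:
--                 lines.append(" ".join(buffer))
--                 buffer = []
--             buffer.append(w)
--         else:
--             buffer.append(w)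
--
--     if buffer:
--         lines.append(" ".join(buffer))
--
--     return lines
-- ===== SOURCE B (Python) =====
-- MONTHS = ("Jan", "Feb", "Mar", "Apr", "May", "Jun",
--           "Jul", "Aug", "Sep", "Oct", "Nov", "Dec")
--
--
-- def merge_into_lines(words):
--     cws = [s for w in words if isinstance(w, str) and (s := w.strip())]
--
--     def segs(ws):
--         if not ws:
--             return []
--         j = 1
--         while j < len(ws) and not ws[j].startswith(MONTHS):
--             j += 1
--         return [" ".join(ws[:j])] + segs(ws[j:])
--
--     return segs(cws)
-- ===== Notes on version B (the rewrite author's own statement) =====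
-- stated objective: simpler
-- what changed: Replaces the interleaved strip/flush loop with mutable buffer state by a two-phase decomposition: clean the words once, then recursively cut the cleaned list into segments at month-prefixed boundaries and join each segment.
import Mathlib
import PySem

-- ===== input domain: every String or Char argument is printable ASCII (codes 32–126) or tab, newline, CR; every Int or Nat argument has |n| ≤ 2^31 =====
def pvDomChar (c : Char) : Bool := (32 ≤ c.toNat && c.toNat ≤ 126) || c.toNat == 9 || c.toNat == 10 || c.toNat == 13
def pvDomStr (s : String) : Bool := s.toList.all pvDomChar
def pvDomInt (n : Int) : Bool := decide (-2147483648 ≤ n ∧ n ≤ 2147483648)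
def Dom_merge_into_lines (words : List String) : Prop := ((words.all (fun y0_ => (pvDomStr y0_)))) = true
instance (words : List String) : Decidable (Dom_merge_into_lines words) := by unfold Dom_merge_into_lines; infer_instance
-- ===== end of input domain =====

-- B replaces A's interleaved strip/flush buffer loop by a two-phase decomposition
-- (clean the words once, then recursively cut at month boundaries); same cost, simpler.


-- ===== PORT A =====
def pvMonths : List String := ["Jan", "Feb", "Mar", "Apr", "May", "Jun",
                               "Jul", "Aug", "Sep", "Oct", "Nov", "Dec"]

def pvFinish (st : List String × List String) : List String :=
  if st.2 ≠ [] then st.1 ++ [PySem.Str.join " " st.2] else st.1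

-- one iteration of A's loop: strip, skip empty, flush buffer before a month word
def pvStepA (st : List String × List String) (w : String) : List String × List String :=
  let w := PySem.Str.strip w
  if w = "" then st
  else if pvMonths.any (fun m => PySem.Str.startswith w m) then
    let lines := if st.2 ≠ [] then st.1 ++ [PySem.Str.join " " st.2] else st.1
    (lines, [w])
  else (st.1, st.2 ++ [w])

def merge_into_lines (words : List String) : List String :=
  pvFinish (words.foldl pvStepA ([], []))

-- ===== PORT B =====
def pvIsMonth (w : String) : Bool :=
  pvMonths.any (fun m => PySem.Str.startswith w m)

-- B's `segs`: first word plus the run of non-month words forms a line; recurse on the rest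
def pvSegs : List String → List String
  | [] => []
  | x :: xs =>
    PySem.Str.join " " (x :: xs.takeWhile (fun w => !pvIsMonth w)) ::
      pvSegs (xs.dropWhile (fun w => !pvIsMonth w))
termination_by ws => ws.length
decreasing_by
  simp only [List.length_cons]
  exact Nat.lt_succ_of_le (xs.length_dropWhile_le _)

def merge_into_lines_alt (words : List String) : List String :=
  pvSegs ((words.map PySem.Str.strip).filter (· ≠ ""))

-- ===== PRECONDITION & SPEC =====
def Spec_merge_into_lines (words : List String) (out : List String) : Prop := out = merge_into_lines_alt words
instance (words : List String) (out : List String) : Decidable (Spec_merge_into_lines words out) := by unfold Spec_merge_into_lines; infer_instance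

-- ===== CLAIM (what is proved, stated in full; the proofs are below) =====
def Claim_equal_merge_into_lines : Prop := ∀ (words : List String), Dom_merge_into_lines words → Spec_merge_into_lines words (merge_into_lines words)

-- ===== LEMMAS AND PROOFS =====

-- A's step on an already-stripped nonempty word
def pvStep' (st : List String × List String) (w : String) : List String × List String :=
  if pvIsMonth w then
    let lines := if st.2 ≠ [] then st.1 ++ [PySem.Str.join " " st.2] else st.1
    (lines, [w])
  else (st.1, st.2 ++ [w])

lemma pvFoldA_eq_fold' (words : List String) (st : List String × List String) :
    words.foldl pvStepA st
      = ((words.map PySem.Str.strip).filter (· ≠ "")).foldl pvStep' st := by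
  induction words generalizing st with
  | nil => rfl
  | cons w ws ih =>
    rw [List.foldl_cons, List.map_cons, List.filter_cons]
    by_cases h : PySem.Str.strip w = ""
    · rw [show pvStepA st w = st from by simp [pvStepA, h]]
      simp only [ne_eq, h, not_true_eq_false, decide_false]
      exact ih st
    · rw [show pvStepA st w = pvStep' st (PySem.Str.strip w) from by
        simp [pvStepA, pvStep', pvIsMonth, h]]
      simp only [ne_eq, h, not_false_eq_true, decide_true]
      exact ih _

lemma pvFold'_segsWith (ws : List String) (lines b : List String) (hb : b ≠ []) :
    pvFinish (ws.foldl pvStep' (lines, b))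
      = lines ++ (PySem.Str.join " " (b ++ ws.takeWhile (fun w => !pvIsMonth w)) ::
          pvSegs (ws.dropWhile (fun w => !pvIsMonth w))) := by
  induction ws generalizing lines b with
  | nil => simp [pvFinish, hb, pvSegs]
  | cons w ws ih =>
    by_cases h : pvIsMonth w
    · simp only [List.foldl_cons, pvStep', if_pos h, hb, ne_eq, not_false_iff, if_true]
      rw [ih _ [w] (by simp)]
      simp [h, pvSegs]
    · simp only [List.foldl_cons, pvStep', if_neg h]
      rw [ih _ (b ++ [w]) (by simp)]
      simp [h, List.append_assoc]

-- ===== VERDICT (by name: the statement is the Claim_ definition above) =====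
theorem merge_into_lines_spec : Claim_equal_merge_into_lines := by
  intro words _
  show merge_into_lines words = merge_into_lines_alt words
  unfold merge_into_lines merge_into_lines_alt
  rw [pvFoldA_eq_fold']
  cases h : (words.map PySem.Str.strip).filter (· ≠ "") with
  | nil => simp [pvFinish, pvSegs]
  | cons x xs =>
    have hx : pvStep' ([], []) x = ([], [x]) := by
      unfold pvStep'; by_cases hm : pvIsMonth x <;> simp [hm]
    rw [List.foldl_cons, hx, pvFold'_segsWith xs [] [x] (by simp)]
    simp [pvSegs]
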